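-- pv_equiv track=rewrite | github.com/Bluntsord/InterviewPrep | CodeSignal/Practice1/Question2.py | solution
-- ===== SOURCE A (Python) =====
-- def solution(s, t):
--     answer = 0
--     for i in range(len(s)):
--         curr = s[i]
--         if curr.isdigit():
--             answer += 1 if s[:i] + s[i + 1:] < t else 0
--
--     for i in range(len(t)):
--         curr = t[i]
--         if curr.isdigit():
--             answer += 1 if t[:i] + t[i + 1:] > s else 0
--
--     return answer
-- ===== SOURCE B (Python) =====
-- def _count(a, b, want):
--     # count digit positions i in a where cmp(a with i-th char deleted, b) == want
--     n, m = len(a), len(b)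
--     p = 0                                   # length of longest common prefix of a and b
--     while p < n and p < m and a[p] == b[p]:
--         p += 1
--     # suf[i] = lexicographic comparison of a[i+1:] with b[i:], computed right-to-left
--     suf = [0] * n
--     for i in range(n - 1, -1, -1):
--         if i == n - 1:
--             suf[i] = -1 if i < m else 0
--         elif i >= m:
--             suf[i] = 1
--         elif a[i + 1] < b[i]:
--             suf[i] = -1
--         elif a[i + 1] > b[i]:
--             suf[i] = 1
--         else:
--             suf[i] = suf[i + 1]
--     # deleting at i <= p leaves the prefixes equal: result is suf[i];
--     # deleting at i > p keeps the first mismatch: result is the same fixed comparison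
--     if p < m:
--         base = -1 if (p < n and a[p] < b[p]) else 1
--     else:
--         base = 1
--     cnt = 0
--     for i, c in enumerate(a):
--         if c.isdigit():
--             r = suf[i] if i <= p else base
--             if r == want:
--                 cnt += 1
--     return cnt
--
--
-- def solution(s, t):
--     return _count(list(s), list(t), -1) + _count(list(t), list(s), 1)
-- ===== Notes on version B (the rewrite author's own statement) =====
-- stated objective: alternative
-- what changed: A rebuilds and lexicographically compares a fresh (n-1)-char string for every digit position; B precomputes the common-prefix length and a right-to-left array of suffix comparisons once and resolves each deletion's comparison from those in O(1), doing O(n+m) comparison work overall instead of O(n) per digit (not measurably faster in CPython, where A's slicing runs in C).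
import Mathlib
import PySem

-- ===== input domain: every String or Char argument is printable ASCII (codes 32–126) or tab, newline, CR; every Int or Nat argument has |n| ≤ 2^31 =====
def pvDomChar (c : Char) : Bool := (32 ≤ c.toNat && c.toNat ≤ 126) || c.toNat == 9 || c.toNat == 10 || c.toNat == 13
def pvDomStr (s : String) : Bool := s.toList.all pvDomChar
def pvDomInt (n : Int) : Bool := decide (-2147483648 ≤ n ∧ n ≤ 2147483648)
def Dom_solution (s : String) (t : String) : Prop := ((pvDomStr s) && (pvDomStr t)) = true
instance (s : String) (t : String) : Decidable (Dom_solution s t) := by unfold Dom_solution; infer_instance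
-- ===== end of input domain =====

-- B replaces A's per-deletion string rebuild-and-compare by a different algorithm: one
-- precomputation (common-prefix length + right-to-left suffix comparisons) resolves each
-- deletion's comparison in O(1).

-- ===== PORT A =====
def solution (s : String) (t : String) : Int :=
  let a := s.toList
  let b := t.toList
  let answer : Int :=
    (PySem.List.pyRange 0 (PySem.List.len a)).foldl
      (fun answer i =>
        let curr := PySem.List.pyGetD a i ' '
        if PySem.Chars.isdigit curr then
          answer + (if PySem.List.slice a none (some i) ++ PySem.List.slice a (some (i + 1)) none < b then 1 else 0)
        else answer) 0
  let answer :=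
    (PySem.List.pyRange 0 (PySem.List.len b)).foldl
      (fun answer i =>
        let curr := PySem.List.pyGetD b i ' '
        if PySem.Chars.isdigit curr then
          -- Python 't[:i] + t[i+1:] > s' is 's < t[:i] + t[i+1:]'
          answer + (if a < PySem.List.slice b none (some i) ++ PySem.List.slice b (some (i + 1)) none then 1 else 0)
        else answer) answer
  answer

-- ===== PORT B =====
-- Source B's while loop computing p, the length of the longest common prefix
def lcpLen : List Char → List Char → Nat
  | x :: xs, y :: ys => if x = y then lcpLen xs ys + 1 else 0
  | [], _ => 0
  | _ :: _, [] => 0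

-- Source B's right-to-left DP array: entry i compares a[i+1:] with b[i:]
def sufList : List Char → List Char → List Int
  | [], _ => []
  | [_], b => [if b.isEmpty then 0 else -1]
  | _ :: x :: xs, b =>
    let rest := sufList (x :: xs) b.tail
    (match b with
     | [] => 1
     | y :: _ => if x < y then -1 else if y < x then 1 else rest.headD 0) :: rest

-- Source B's _count(a, b, want)
def countDel (a b : List Char) (want : Int) : Int :=
  let p := lcpLen a b
  let suf := sufList a b
  let base : Int := if p < b.length then (if p < a.length ∧ a.getD p ' ' < b.getD p ' ' then -1 else 1) else 1
  (PySem.List.enumerate a).foldl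
    (fun cnt ic =>
      if PySem.Chars.isdigit ic.2 then
        (if (if ic.1 ≤ (p : Int) then PySem.List.pyGetD suf ic.1 0 else base) = want then cnt + 1 else cnt)
      else cnt) 0

def solution_alt (s : String) (t : String) : Int :=
  countDel s.toList t.toList (-1) + countDel t.toList s.toList 1

-- ===== PRECONDITION & SPEC =====
def Spec_solution (s : String) (t : String) (out : Int) : Prop := out = solution_alt s t
instance (s : String) (t : String) (out : Int) : Decidable (Spec_solution s t out) := by unfold Spec_solution; infer_instance

-- ===== CLAIM (what is proved, stated in full; the proofs are below) =====
def Claim_equal_solution : Prop := ∀ (s : String) (t : String), Dom_solution s t → Spec_solution s t (solution s t)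

-- ===== LEMMAS AND PROOFS =====

-- lexicographic three-way comparison: the value Source B's suf/base entries stand for
def cmpI : List Char → List Char → Int
  | [], [] => 0
  | [], _ :: _ => -1
  | _ :: _, [] => 1
  | x :: xs, y :: ys => if x < y then -1 else if y < x then 1 else cmpI xs ys

theorem cmpI_cons_cons (x y : Char) (xs ys : List Char) :
    cmpI (x :: xs) (y :: ys) = if x < y then -1 else if y < x then 1 else cmpI xs ys := rfl

theorem cmpI_append (u x y : List Char) : cmpI (u ++ x) (u ++ y) = cmpI x y := by
  induction u with
  | nil => rfl
  | cons c u ih => simp [cmpI, ih]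

theorem cmpI_eq_neg_one_iff (x y : List Char) : cmpI x y = -1 ↔ x < y := by
  induction x generalizing y with
  | nil => cases y <;> simp [cmpI]
  | cons c x ih =>
    cases y with
    | nil => simp [cmpI]
    | cons d y =>
      by_cases h1 : c < d
      · simp [cmpI, h1, List.cons_lt_cons_iff]
      · by_cases h2 : d < c
        · have h3 : c ≠ d := ne_of_gt h2
          simp [cmpI, h1, h2, h3, List.cons_lt_cons_iff]
        · have : c = d := le_antisymm (not_lt.1 h2) (not_lt.1 h1)
          subst this
          simp [cmpI, ih, List.cons_lt_cons_iff]

theorem cmpI_eq_one_iff (x y : List Char) : cmpI x y = 1 ↔ y < x := by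
  induction x generalizing y with
  | nil => cases y <;> simp [cmpI]
  | cons c x ih =>
    cases y with
    | nil => simp [cmpI]
    | cons d y =>
      by_cases h1 : c < d
      · have h2 : ¬ d < c := not_lt.2 h1.le
        have h3 : d ≠ c := ne_of_gt h1
        simp [cmpI, h1, h2, h3, List.cons_lt_cons_iff]
      · by_cases h2 : d < c
        · simp [cmpI, h1, h2, List.cons_lt_cons_iff]
        · have : c = d := le_antisymm (not_lt.1 h2) (not_lt.1 h1)
          subst this
          simp [cmpI, ih, List.cons_lt_cons_iff]


theorem lcpLen_le_right (a b : List Char) : lcpLen a b ≤ b.length := by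
  fun_induction lcpLen <;> simp_all

theorem take_lcpLen_eq (a b : List Char) : a.take (lcpLen a b) = b.take (lcpLen a b) := by
  fun_induction lcpLen <;> simp_all

theorem lcpLen_ne (a b : List Char) (h1 : lcpLen a b < a.length) (h2 : lcpLen a b < b.length) :
    a.getD (lcpLen a b) ' ' ≠ b.getD (lcpLen a b) ' ' := by
  fun_induction lcpLen <;> simp_all


theorem sufList_getD (a b : List Char) (i : Nat) (h : i < a.length) :
    (sufList a b).getD i 0 = cmpI (a.drop (i + 1)) (b.drop i) := by
  induction a generalizing b i with
  | nil => simp at h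
  | cons x0 rest ih =>
    cases rest with
    | nil =>
      have : i = 0 := by simpa using Nat.lt_one_iff.1 (by simpa using h)
      subst this
      cases b <;> simp [sufList, cmpI]
    | cons x1 xs =>
      cases i with
      | zero =>
        cases b with
        | nil => simp [sufList, cmpI]
        | cons y ys =>
          have h0 := ih ys 0 (by simp)
          simp only [List.drop_zero, List.drop_succ_cons, List.getD] at h0
          simp only [sufList, List.tail_cons]
          simp [cmpI, List.head?_eq_getElem?, h0]
      | succ j =>
        have hj : j < (x1 :: xs).length := by simpa using Nat.lt_of_succ_lt_succ h
        have hrec := ih b.tail j hj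
        simp only [sufList]
        simp only [List.getD_cons_succ]
        rw [hrec]
        congr 1
        cases b <;> simp

theorem key (a b : List Char) (k : Nat) (hk : k < a.length) :
    (if k ≤ lcpLen a b then (sufList a b).getD k 0
     else if lcpLen a b < b.length then
       (if lcpLen a b < a.length ∧ a.getD (lcpLen a b) ' ' < b.getD (lcpLen a b) ' ' then (-1 : Int) else 1)
     else (1 : Int))
    = cmpI (a.take k ++ a.drop (k + 1)) b := by
  by_cases hkp : k ≤ lcpLen a b
  · have htake : a.take k = b.take k := by
      have h := take_lcpLen_eq a b
      have h1 : a.take k = (a.take (lcpLen a b)).take k := by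
        rw [List.take_take, Nat.min_eq_left hkp]
      have h2 : b.take k = (b.take (lcpLen a b)).take k := by
        rw [List.take_take, Nat.min_eq_left hkp]
      rw [h1, h2, h]
    conv_rhs => rw [show b = b.take k ++ b.drop k from (List.take_append_drop k b).symm]
    rw [← htake, cmpI_append, sufList_getD a b k hk]
    simp [hkp]
  · push_neg at hkp
    set p := lcpLen a b with hp
    have hpa : p < a.length := lt_trans hkp hk
    have hsplit1 : a.take k ++ a.drop (k + 1)
        = a.take (p) ++ ((a.take k).drop (p) ++ a.drop (k + 1)) := by
      rw [← List.append_assoc]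
      congr 1
      have : a.take (p) = (a.take k).take (p) := by
        rw [List.take_take, Nat.min_eq_left (le_of_lt hkp)]
      rw [this, List.take_append_drop]
    have hsplit2 : b = a.take (p) ++ b.drop (p) := by
      conv_lhs => rw [← List.take_append_drop (p) b]
      rw [take_lcpLen_eq a b]
    rw [hsplit1]
    conv_rhs => rw [hsplit2]
    rw [cmpI_append]
    have hL : (a.take k).drop (p)
        = a[p]'hpa :: ((a.take k).drop (p + 1)) := by
      rw [List.drop_eq_getElem_cons (by simp; omega)]
      congr 1
      exact List.getElem_take
    by_cases hpb : p < b.length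
    · have hbd : b.drop (p) = b[p]'hpb :: b.drop (p + 1) :=
        List.drop_eq_getElem_cons hpb
      have hga : a.getD p ' ' = a[p]'hpa := List.getD_eq_getElem a ' ' hpa
      have hgb : b.getD p ' ' = b[p]'hpb := List.getD_eq_getElem b ' ' hpb
      have hne : a[p]'hpa ≠ b[p]'hpb := by
        have h := lcpLen_ne a b (hp ▸ hpa) (hp ▸ hpb)
        rw [← hp] at h
        rw [hga, hgb] at h
        exact h
      rw [if_neg (Nat.not_le.2 hkp), if_pos hpb, hL, hbd]
      simp only [hga, hgb, hpa, true_and]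
      rw [List.cons_append]
      by_cases hlt : a[p]'hpa < b[p]'hpb
      · rw [if_pos hlt, cmpI_cons_cons, if_pos hlt]
      · have hgt : b[p]'hpb < a[p]'hpa :=
          lt_of_le_of_ne (not_lt.1 hlt) (Ne.symm hne)
        rw [if_neg hlt, cmpI_cons_cons, if_neg hlt, if_pos hgt]
    · have hpm : p = b.length := le_antisymm (lcpLen_le_right a b) (not_lt.1 hpb)
      have hbd : b.drop (p) = [] := by simp [hpm]
      rw [hL, hbd]
      simp [cmpI, hpb, Nat.not_le.2 hkp]

theorem body_eq (cnt : Int) (d : Bool) (r : Prop) [Decidable r] :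
    (if d then (if r then cnt + 1 else cnt) else cnt) = cnt + (if d = true ∧ r then 1 else 0) := by
  by_cases hd : d <;> by_cases hr : r <;> simp [hd, hr]

theorem body_eq2 (cnt : Int) (d : Bool) (r : Prop) [Decidable r] :
    (if d then cnt + (if r then (1:Int) else 0) else cnt) = cnt + (if d = true ∧ r then 1 else 0) := by
  by_cases hd : d <;> by_cases hr : r <;> simp [hd, hr]

theorem countDel_eq_sum (a b : List Char) (want : Int) :
    countDel a b want =
      ((List.range a.length).map (fun k =>
        if PySem.Chars.isdigit (a.getD k ' ') ∧ cmpI (a.take k ++ a.drop (k + 1)) b = want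
        then (1 : Int) else 0)).sum := by
  unfold countDel
  rw [PySem.List.enumerate_eq_map_pyRange a ' ', List.foldl_map]
  rw [PySem.List.foldl_congr_mem _ _
      (fun cnt j => cnt +
        (if PySem.Chars.isdigit (PySem.List.pyGetD a j ' ') ∧
            (if j ≤ (lcpLen a b : Int) then PySem.List.pyGetD (sufList a b) j 0
             else if lcpLen a b < b.length then
               (if lcpLen a b < a.length ∧ a.getD (lcpLen a b) ' ' < b.getD (lcpLen a b) ' ' then (-1:Int) else 1)
             else 1) = want
         then (1 : Int) else 0)) 0
      (fun acc x _ => body_eq acc _ _)]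
  rw [PySem.List.foldl_add]
  rw [PySem.List.pyRange_one]
  simp only [List.map_map, PySem.List.len, Int.sub_zero, Int.toNat_natCast, zero_add]
  congr 1
  apply List.map_congr_left
  intro k hk
  have hk' : k < a.length := List.mem_range.1 hk
  simp only [Function.comp, zero_add, PySem.List.pyGetD_natCast, Nat.cast_le,
    Nat.cast_lt]
  rw [key a b k hk']

theorem side_lt (a b : List Char) (init : Int) :
    (PySem.List.pyRange 0 (PySem.List.len a)).foldl
      (fun answer i =>
        if PySem.Chars.isdigit (PySem.List.pyGetD a i ' ') then
          answer + (if PySem.List.slice a none (some i) ++ PySem.List.slice a (some (i + 1)) none < b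
                    then (1:Int) else 0)
        else answer) init
    = init + countDel a b (-1) := by
  rw [countDel_eq_sum]
  rw [PySem.List.foldl_congr_mem _ _
      (fun answer i => answer +
        (if PySem.Chars.isdigit (PySem.List.pyGetD a i ' ') = true ∧
            PySem.List.slice a none (some i) ++ PySem.List.slice a (some (i + 1)) none < b
         then (1:Int) else 0)) init
      (fun acc x _ => body_eq2 acc _ _)]
  rw [PySem.List.foldl_add, PySem.List.pyRange_one]
  simp only [List.map_map, PySem.List.len, Int.sub_zero, Int.toNat_natCast]
  refine congrArg (fun z => init + z) (congrArg (List.sum (α := Int)) (List.map_congr_left ?_))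
  intro k hk
  simp only [Function.comp, zero_add, PySem.List.pyGetD_natCast, PySem.List.slice_to_natCast]
  rw [show ((k : Int) + 1) = ((k + 1 : Nat) : Int) from by push_cast; ring]
  rw [PySem.List.slice_from_natCast]
  simp [cmpI_eq_neg_one_iff]

theorem side_gt (a b : List Char) (init : Int) :
    (PySem.List.pyRange 0 (PySem.List.len b)).foldl
      (fun answer i =>
        if PySem.Chars.isdigit (PySem.List.pyGetD b i ' ') then
          answer + (if a < PySem.List.slice b none (some i) ++ PySem.List.slice b (some (i + 1)) none
                    then (1:Int) else 0)
        else answer) init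
    = init + countDel b a 1 := by
  rw [countDel_eq_sum]
  rw [PySem.List.foldl_congr_mem _ _
      (fun answer i => answer +
        (if PySem.Chars.isdigit (PySem.List.pyGetD b i ' ') = true ∧
            a < PySem.List.slice b none (some i) ++ PySem.List.slice b (some (i + 1)) none
         then (1:Int) else 0)) init
      (fun acc x _ => body_eq2 acc _ _)]
  rw [PySem.List.foldl_add, PySem.List.pyRange_one]
  simp only [List.map_map, PySem.List.len, Int.sub_zero, Int.toNat_natCast]
  refine congrArg (fun z => init + z) (congrArg (List.sum (α := Int)) (List.map_congr_left ?_))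
  intro k hk
  simp only [Function.comp, zero_add, PySem.List.pyGetD_natCast, PySem.List.slice_to_natCast]
  rw [show ((k : Int) + 1) = ((k + 1 : Nat) : Int) from by push_cast; ring]
  rw [PySem.List.slice_from_natCast]
  simp [cmpI_eq_one_iff]

-- ===== VERDICT (by name: the statement is the Claim_ definition above) =====
theorem solution_spec : Claim_equal_solution := by
  intro s t _
  unfold Spec_solution
  show solution s t = solution_alt s t
  simp only [solution, solution_alt]
  rw [side_lt, side_gt]
  ring
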